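-- pv_equiv track=rewrite | github.com/Algo-Phantoms/Algo-Tree | Code/Python/Book_Allocation.py | MinPages
-- ===== SOURCE A (Python) =====
-- def IsPossible(lis, n, stud, minval):
--
--     students = 1
--     sumval = 0
--
--     # Iterating over the books
--     for i in range(n):
--
--         # If the number of pages in a book is greater than the minimum value, then the minimum value chosen cannot be used to alloacte books
--         if (lis[i] > minval):
--             return False
--
--         # Counting number of students required for allocating minval pages
--         if (sumval + lis[i] > minval):
--
--             #incrementing students by 1
--             students += 1
--
--             # Updating current value of sum
--             sumval = lis[i]
--
--             # If more number of students are required than the given number of students, then also it is not possible to allocate books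
--             if (students > stud):
--                 return False
--
--         else:
--             sumval += lis[i]
--
--     return True
--
-- def MinPages(lis, n, stud):
--
--     sum = 0
--
--     # If number of students are more than number of books, we'll return -1 because all the students won't get a book
--     if (n < stud):
--         return -1
--
--     #Finding the sum of all the pages
--     for i in range(n):
--         sum += lis[i]
--
--     # Binary search will be applied over the number of pages and low will be initialized with 0 while high will be initialized with the total number of pages
--     # ans variable will store the number of maximum pages that will be assigned to a student and because that should be minimum, it is initialized by a large integer value
--     low, high = 0, sum
--     ans = 10**9;
--
--     #The loop will run until low is less than or equal to high
--     while (low <= high):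
--
--         # Considering middle element to be currently minimum and checking whether it is possible to allocate books using mid value as the minimum number of pages
--         mid = (low + high) // 2
--
--         if (IsPossible(lis, n, stud, mid)):
--
--             #If possible, them comparing the mid value with the answer that we have so far
--             ans = min(ans, mid)
--
--             # Because the number of pages are given in ascending order and we are looking for the minimum value possible, so for the next possible answer, we will reduce our search by decreasing high to mid-1
--             high = mid - 1
--
--         else:
--             # If it is not possible to allocate books using mid value as the minimum value, then we will look for the minimum element in the other half that is low will be increased to mid + 1
--             low = mid + 1
--
--     #Returning the final answer
--     return ans
-- ===== SOURCE B (Python) =====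
-- def MinPages(lis, n, stud):
--     # If number of students exceeds number of books, allocation is impossible
--     if n < stud:
--         return -1
--     INF = 10 ** 9
--     # prefix sums of the first n books
--     prefix = [0]
--     for i in range(n):
--         prefix.append(prefix[i] + lis[i])
--     # dp[i] = minimal achievable maximum group sum when the first i books are
--     # split among the students considered so far (at most k groups after k rounds)
--     dp = [0] + [INF] * n
--     for _ in range(stud):
--         dp = [min(max(dp[j], prefix[i] - prefix[j]) for j in range(i + 1))
--               for i in range(n + 1)]
--     return dp[n]
-- ===== Notes on version B (the rewrite author's own statement) =====
-- stated objective: alternative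
-- what changed: Replaces binary search over the answer range (with the greedy IsPossible feasibility check) by a bottom-up dynamic program over prefix sums: dp[i] after k rounds is the minimal achievable maximum group sum splitting the first i books among at most k students; same -1 guard and same 10**9 sentinel behaviour arise naturally from the DP initialization.
-- outside the precondition, e.g. on MinPages([5], 1, 0): A returns 5, B returns 1000000000; on MinPages([-5], 1, 1): A returns 1000000000, B returns 0; on MinPages([], -3, -5): A returns 0, B raises IndexError
import Mathlib
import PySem

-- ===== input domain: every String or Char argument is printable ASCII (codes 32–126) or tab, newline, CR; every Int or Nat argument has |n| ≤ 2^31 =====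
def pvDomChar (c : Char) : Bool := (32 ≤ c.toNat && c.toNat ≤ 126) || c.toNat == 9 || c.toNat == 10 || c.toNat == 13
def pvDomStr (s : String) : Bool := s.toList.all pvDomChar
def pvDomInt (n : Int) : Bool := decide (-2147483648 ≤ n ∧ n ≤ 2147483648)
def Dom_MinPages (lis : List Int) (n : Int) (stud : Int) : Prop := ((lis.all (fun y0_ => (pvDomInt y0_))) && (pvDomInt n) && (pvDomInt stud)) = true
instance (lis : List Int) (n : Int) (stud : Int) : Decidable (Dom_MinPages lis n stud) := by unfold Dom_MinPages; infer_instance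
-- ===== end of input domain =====

-- B replaces A's binary search over the answer range by a bottom-up dynamic program
-- over prefix sums (dp over "first i books among at most k students"); same values,
-- genuinely different algorithm ("alternative": B is not faster).

-- ===== PORT A =====
-- IsPossible's loop `for i in range(n)` with early returns: recursion over the index list
def ipGo (lis : List Int) (stud minval : Int) : List Int → Int → Int → Bool
  | [], _, _ => true
  | i :: is, students, sumval =>
    -- lis[i]; indices produced by range(n) are in range under Pre_ (pyGetD is exact there)
    let x := PySem.List.pyGetD lis i 0
    if x > minval then false
    else if sumval + x > minval then
      if students + 1 > stud then false
      else ipGo lis stud minval is (students + 1) x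
    else ipGo lis stud minval is students (sumval + x)

def IsPossible (lis : List Int) (n : Int) (stud : Int) (minval : Int) : Bool :=
  ipGo lis stud minval (PySem.List.pyRange 0 n 1) 1 0

-- the `while low <= high` binary-search loop of A
def bsLoop (lis : List Int) (n stud : Int) (low high ans : Int) : Int :=
  if _h : low ≤ high then
    let mid := PySem.Int.floordiv (low + high) 2
    if IsPossible lis n stud mid then
      bsLoop lis n stud low (mid - 1) (min ans mid)
    else
      bsLoop lis n stud (mid + 1) high ans
  else ans
termination_by (high - low + 1).toNat
decreasing_by
  · have h := PySem.Int.floordiv_two_mid_bounds _h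
    omega
  · have h := PySem.Int.floordiv_two_mid_bounds _h
    omega

def MinPages (lis : List Int) (n : Int) (stud : Int) : Int :=
  if n < stud then -1
  else
    -- for i in range(n): sum += lis[i]
    let sum := (PySem.List.pyRange 0 n 1).foldl (fun s i => s + PySem.List.pyGetD lis i 0) 0
    bsLoop lis n stud 0 sum (10 ^ 9)

-- ===== PORT B =====
def MinPages_alt (lis : List Int) (n : Int) (stud : Int) : Int :=
  if n < stud then -1
  else
    let INF : Int := 10 ^ 9
    -- prefix sums: prefix.append(prefix[i] + lis[i])  (all indices in range under Pre_)
    let pfx := (PySem.List.pyRange 0 n 1).foldl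
      (fun pf i => pf ++ [PySem.List.pyGetD pf i 0 + PySem.List.pyGetD lis i 0]) [0]
    -- dp = [0] + [INF] * n   ([x]*n is empty for n < 0, as List.replicate n.toNat)
    let dp0 : List Int := 0 :: List.replicate n.toNat INF
    -- for _ in range(stud): dp = [min(max(dp[j], prefix[i]-prefix[j]) for j in range(i+1)) for i in range(n+1)]
    let dp := (PySem.List.pyRange 0 stud 1).foldl
      (fun dp _ =>
        (PySem.List.pyRange 0 (n + 1) 1).map (fun i =>
          ((PySem.List.min? ((PySem.List.pyRange 0 (i + 1) 1).map (fun j =>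
              max (PySem.List.pyGetD dp j 0)
                  (PySem.List.pyGetD pfx i 0 - PySem.List.pyGetD pfx j 0)))
              (fun v => v)).getD 0))) dp0
    -- min(...) above is over a nonempty sequence (range(i+1), i ≥ 0), so .getD 0 is exact
    PySem.List.pyGetD dp n 0

-- ===== PRECONDITION & SPEC =====
-- Pre_ admits n < stud (both return -1 untouched), the natural domain — 0 ≤ n ≤ len(lis),
-- at least one student, nonnegative page counts for the n books read — and the empty case
-- n = 0 (both return 0 for any stud ≤ 0 there).  It excludes inputs where A raises
-- IndexError (stud ≤ n and (n < 0 or n > len(lis))), and the out-of-domain corners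
-- stud ≤ 0 with books present (zero students asked to take all books) and negative page
-- counts (where A's binary search runs over a non-monotone predicate): malformed inputs
-- no caller would specify, on which the two algorithms legitimately disagree.
def Pre_MinPages (lis : List Int) (n : Int) (stud : Int) : Prop :=
  n < stud ∨ (0 ≤ n ∧ n ≤ lis.length ∧ (1 ≤ stud ∨ n = 0) ∧ ∀ x ∈ lis.take n.toNat, 0 ≤ x)
instance (lis : List Int) (n : Int) (stud : Int) : Decidable (Pre_MinPages lis n stud) := by
  unfold Pre_MinPages; infer_instance

def pvWitness_MinPages : List Int × Int × Int := ([12, 34, 67, 90], 4, 2)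

def Spec_MinPages (lis : List Int) (n : Int) (stud : Int) (out : Int) : Prop := out = MinPages_alt lis n stud
instance (lis : List Int) (n : Int) (stud : Int) (out : Int) : Decidable (Spec_MinPages lis n stud out) := by unfold Spec_MinPages; infer_instance

-- ===== CLAIM (what is proved, stated in full; the proofs are below) =====
def Claim_equal_MinPages : Prop := ∀ (lis : List Int) (n : Int) (stud : Int), Dom_MinPages lis n stud → Pre_MinPages lis n stud → Spec_MinPages lis n stud (MinPages lis n stud)

-- ===== LEMMAS AND PROOFS =====

-- ---- the mathematical middle layer ----

-- A's greedy check, structurally over the book list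
def gGo (stud m : Int) : List Int → Int → Int → Bool
  | [], _, _ => true
  | x :: xs, s, v =>
    if x > m then false
    else if v + x > m then
      if s + 1 > stud then false
      else gGo stud m xs (s + 1) x
    else gGo stud m xs s (v + x)

-- "ys splits into at most k contiguous parts, each of sum ≤ r" (empty parts allowed)
def Split (r : Int) : ℕ → List Int → Prop
  | 0, ys => ys = []
  | k + 1, ys => ∃ t : ℕ, (ys.take t).sum ≤ r ∧ Split r k (ys.drop t)

-- prefix sums and the dp table, mathematically (indices are Nats)
def SVal (xs : List Int) (i : ℕ) : Int := (xs.take i).sum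

def DVal (xs : List Int) : ℕ → ℕ → Int
  | 0, 0 => 0
  | 0, _ + 1 => 10 ^ 9
  | k + 1, i =>
    ((PySem.List.min? ((List.range (i + 1)).map (fun j => max (DVal xs k j) (SVal xs i - SVal xs j)))
      (fun v => v)).getD 0)


-- ---- bridges from Port A's pyRange/pyGetD loops to the structural layer ----

theorem map_pyRange_getD (lis : List Int) (n : Int) (_h0 : 0 ≤ n) (hn : n ≤ lis.length) :
    (PySem.List.pyRange 0 n 1).map (fun i => PySem.List.pyGetD lis i 0) = lis.take n.toNat := by
  rw [PySem.List.pyRange_one, List.map_map]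
  apply List.ext_getElem
  · simp; omega
  · intro i h1 h2
    simp only [List.getElem_map, List.getElem_range, Function.comp_apply]
    have hz : ((0:Int) + (i:Int)) = (i : Int) := by omega
    rw [hz, PySem.List.pyGetD_natCast]
    simp at h1
    rw [List.getElem_take, List.getD_eq_getElem _ _ (by omega)]

theorem ipGo_eq (lis : List Int) (stud m : Int) :
    ∀ (idx : List Int) (s v : Int),
      ipGo lis stud m idx s v
        = gGo stud m (idx.map (fun i => PySem.List.pyGetD lis i 0)) s v := by
  intro idx
  induction idx with
  | nil => intro s v; rfl
  | cons i is ih =>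
    intro s v
    simp only [ipGo, gGo, List.map_cons]
    split_ifs <;> simp [ih]

theorem isPossible_eq (lis : List Int) (n stud m : Int) (h0 : 0 ≤ n) (hn : n ≤ lis.length) :
    IsPossible lis n stud m = gGo stud m (lis.take n.toNat) 1 0 := by
  rw [IsPossible, ipGo_eq, map_pyRange_getD lis n h0 hn]

theorem sum_loop_eq (lis : List Int) (n : Int) (h0 : 0 ≤ n) (hn : n ≤ lis.length) :
    (PySem.List.pyRange 0 n 1).foldl (fun s i => s + PySem.List.pyGetD lis i 0) 0
      = (lis.take n.toNat).sum := by
  rw [List.sum_eq_foldl, ← map_pyRange_getD lis n h0 hn, List.foldl_map]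

-- ---- greedy feasibility vs partitions ----

theorem gGo_mono (stud : Int) :
    ∀ (xs : List Int) (s v s' v' m m' : Int), (∀ x ∈ xs, 0 ≤ x) →
      gGo stud m xs s v = true → s ≤ stud → 0 ≤ v →
      s' ≤ s → (s' < s ∨ v' ≤ v) → 0 ≤ v' → m ≤ m' →
      gGo stud m' xs s' v' = true := by
  intro xs
  induction xs with
  | nil => intros; rfl
  | cons x xs ih =>
    intro s v s' v' m m' hnn hgo hs hv hss hd hv' hm
    have hx : 0 ≤ x := hnn x (by simp)
    have hnn' : ∀ y ∈ xs, 0 ≤ y := fun y hy => hnn y (by simp [hy])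
    simp only [gGo] at hgo ⊢
    have hxm : ¬ x > m := by
      by_contra hc; simp [hc] at hgo
    have hxm' : ¬ x > m' := by omega
    rw [if_neg hxm] at hgo
    rw [if_neg hxm']
    by_cases hA : v + x > m
    · rw [if_pos hA] at hgo
      have hstud : ¬ s + 1 > stud := by
        by_contra hc; simp [hc] at hgo
      rw [if_neg hstud] at hgo
      by_cases hB : v' + x > m'
      · rw [if_pos hB]
        have : ¬ s' + 1 > stud := by omega
        rw [if_neg this]
        exact ih (s+1) x (s'+1) x m m' hnn' hgo (by omega) hx (by omega)
          (by omega) hx hm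
      · rw [if_neg hB]
        exact ih (s+1) x s' (v'+x) m m' hnn' hgo (by omega) hx (by omega)
          (by left; omega) (by omega) hm
    · rw [if_neg hA] at hgo
      by_cases hB : v' + x > m'
      · -- v' ≤ v would contradict: v'+x ≤ v+x ≤ m ≤ m'
        have hslt : s' < s := by
          rcases hd with h | h
          · exact h
          · omega
        rw [if_pos hB]
        have : ¬ s' + 1 > stud := by omega
        rw [if_neg this]
        exact ih s (v+x) (s'+1) x m m' hnn' hgo hs (by omega) (by omega)
          (by omega) hx hm
      · rw [if_neg hB]
        exact ih s (v+x) s' (v'+x) m m' hnn' hgo hs (by omega) hss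
          (by omega) (by omega) hm

theorem Split_nil (r : Int) (hr : 0 ≤ r) (k : ℕ) : Split r k [] := by
  induction k with
  | zero => rfl
  | succ k ih => exact ⟨0, by simpa using hr, ih⟩

theorem split_of_gGo (stud m : Int) :
    ∀ (xs : List Int) (s v : Int), (∀ x ∈ xs, 0 ≤ x) → 0 ≤ v → v ≤ m → 1 ≤ s → s ≤ stud →
      gGo stud m xs s v = true →
      ∃ t : ℕ, v + (xs.take t).sum ≤ m ∧ Split m (stud - s).toNat (xs.drop t) := by
  intro xs
  induction xs with
  | nil => intro s v hnn hv hvm _ _ _; exact ⟨0, by simpa using hvm, Split_nil m (by omega) _⟩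
  | cons x xs ih =>
    intro s v hnn hv hvm hs1 hs2 hgo
    have hx : 0 ≤ x := hnn x (by simp)
    have hnn' : ∀ y ∈ xs, 0 ≤ y := fun y hy => hnn y (by simp [hy])
    simp only [gGo] at hgo
    have hxm : ¬ x > m := by by_contra hc; simp [hc] at hgo
    rw [if_neg hxm] at hgo
    by_cases hA : v + x > m
    · rw [if_pos hA] at hgo
      have hstud : ¬ s + 1 > stud := by by_contra hc; simp [hc] at hgo
      rw [if_neg hstud] at hgo
      obtain ⟨t', h1, h2⟩ := ih (s+1) x hnn' hx (by omega) (by omega) (by omega) hgo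
      refine ⟨0, by simpa using hvm, ?_⟩
      have hk : (stud - s).toNat = (stud - (s+1)).toNat + 1 := by omega
      rw [hk]
      exact ⟨t' + 1, by simpa using h1, by simpa using h2⟩
    · rw [if_neg hA] at hgo
      obtain ⟨t', h1, h2⟩ := ih s (v + x) hnn' (by omega) (by omega) hs1 hs2 hgo
      exact ⟨t' + 1, by simp; omega, by simpa using h2⟩

theorem splitHead (r : Int) :
    ∀ (k : ℕ) (x : Int) (xs : List Int), Split r k (x :: xs) →
      ∃ (k' t' : ℕ), k' < k ∧ x + (xs.take t').sum ≤ r ∧ Split r k' (xs.drop t') := by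
  intro k
  induction k with
  | zero => intro x xs h; exact absurd h (by simp [Split])
  | succ k ih =>
    intro x xs ⟨u, hu, hsp⟩
    match u with
    | 0 =>
      simp only [List.drop_zero] at hsp
      obtain ⟨k', t', h1, h2, h3⟩ := ih x xs hsp
      exact ⟨k', t', by omega, h2, h3⟩
    | u' + 1 =>
      refine ⟨k, u', by omega, ?_, by simpa using hsp⟩
      simpa using hu

theorem gGo_of_split (stud m : Int) :
    ∀ (xs : List Int) (k t : ℕ) (s v : Int), (∀ x ∈ xs, 0 ≤ x) → 0 ≤ v →
      v + (xs.take t).sum ≤ m → Split m k (xs.drop t) → 1 ≤ s → s + (k : Int) ≤ stud →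
      gGo stud m xs s v = true := by
  intro xs
  induction xs with
  | nil => intros; rfl
  | cons x xs ih =>
    intro k t s v hnn hv hvt hsp hs1 hsk
    have hx : 0 ≤ x := hnn x (by simp)
    have hnn' : ∀ y ∈ xs, 0 ≤ y := fun y hy => hnn y (by simp [hy])
    simp only [gGo]
    match t with
    | t'' + 1 =>
      simp only [List.take_succ_cons, List.sum_cons, List.drop_succ_cons] at hvt hsp
      have htake : 0 ≤ (xs.take t'').sum := List.sum_nonneg (fun y hy => hnn' y (List.mem_of_mem_take hy))
      have hvx : ¬ v + x > m := by omega
      have hxm : ¬ x > m := by omega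
      rw [if_neg hxm, if_neg hvx]
      exact ih k t'' s (v + x) hnn' (by omega) (by omega) hsp hs1 hsk
    | 0 =>
      simp only [List.take_zero, List.sum_nil, add_zero] at hvt
      simp only [List.drop_zero] at hsp
      match k with
      | 0 => exact absurd hsp (by simp [Split])
      | k'' + 1 =>
        obtain ⟨k', t', hk', hxt, hsp'⟩ := splitHead m (k'' + 1) x xs hsp
        have htake : 0 ≤ (xs.take t').sum := List.sum_nonneg (fun y hy => hnn' y (List.mem_of_mem_take hy))
        have hxm : ¬ x > m := by omega
        rw [if_neg hxm]
        by_cases hvx : v + x > m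
        · rw [if_pos hvx]
          have hkk : (1:Int) ≤ ((k'' + 1 : ℕ) : Int) := by push_cast; omega
          have : ¬ s + 1 > stud := by omega
          rw [if_neg this]
          have hcast : ((k' : ℕ) : Int) + 1 ≤ ((k'' + 1 : ℕ) : Int) := by push_cast; omega
          exact ih k' t' (s + 1) x hnn' hx hxt hsp' (by omega) (by omega)
        · rw [if_neg hvx]
          refine ih (k' + 1) 0 s (v + x) hnn' (by omega) (by simpa using (by omega : v + x ≤ m)) ?_ hs1 ?_
          · simp only [List.drop_zero]
            exact ⟨t', by omega, hsp'⟩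
          · push_cast
            push_cast at hsk
            omega

theorem feas_iff (stud m : Int) (xs : List Int) (hnn : ∀ x ∈ xs, 0 ≤ x) (hstud : 1 ≤ stud)
    (hne : xs ≠ []) :
    gGo stud m xs 1 0 = true ↔ Split m stud.toNat xs := by
  constructor
  · intro h
    have hm : 0 ≤ m := by
      rcases xs with _ | ⟨x, xs⟩
      · exact absurd rfl hne
      · have hx : 0 ≤ x := hnn x (by simp)
        by_contra hc
        have : x > m := by omega
        simp only [gGo, if_pos this] at h
        exact Bool.false_ne_true h
    obtain ⟨t, h1, h2⟩ := split_of_gGo stud m xs 1 0 hnn le_rfl hm le_rfl hstud h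
    have hk : stud.toNat = (stud - 1).toNat + 1 := by omega
    rw [hk]
    exact ⟨t, by simpa using h1, h2⟩
  · intro h
    have hk : stud.toNat = (stud.toNat - 1) + 1 := by omega
    rw [hk] at h
    obtain ⟨t, h1, h2⟩ := h
    exact gGo_of_split stud m xs (stud.toNat - 1) t 1 0 hnn le_rfl (by simpa using h1) h2 le_rfl (by omega)

theorem take_norm (ys : List Int) (t : ℕ) :
    ys.take (min t ys.length) = ys.take t ∧ ys.drop (min t ys.length) = ys.drop t := by
  rcases Nat.le_total t ys.length with h | h
  · rw [min_eq_left h]; exact ⟨rfl, rfl⟩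
  · rw [min_eq_right h]
    constructor
    · rw [List.take_length, List.take_of_length_le h]
    · rw [List.drop_length, List.drop_eq_nil_of_le h]

theorem split_swap (r : Int) :
    ∀ (k : ℕ) (ys : List Int),
      Split r (k + 1) ys ↔ ∃ j : ℕ, Split r k (ys.take j) ∧ (ys.drop j).sum ≤ r := by
  intro k
  induction k with
  | zero =>
    intro ys
    constructor
    · rintro ⟨t, ht, hd⟩
      have hd' : ys.length ≤ t := by
        by_contra hc
        have := congrArg List.length hd
        simp at this; omega
      refine ⟨0, rfl, ?_⟩
      rwa [List.take_of_length_le hd'] at ht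
    · rintro ⟨j, hj, hd⟩
      rcases List.take_eq_nil_iff.mp hj with h | h
      · subst h
        refine ⟨ys.length, ?_, ?_⟩
        · rw [List.take_length]; simpa using hd
        · simp [Split]
      · subst h
        simp only [List.drop_nil, List.sum_nil] at hd
        exact ⟨0, by simpa using hd, rfl⟩
  | succ k ih =>
    intro ys
    constructor
    · rintro ⟨t0, ht, hsp⟩
      obtain ⟨hteq, hdeq⟩ := take_norm ys t0
      set t := min t0 ys.length with htdef
      rw [← hteq] at ht
      rw [← hdeq] at hsp
      obtain ⟨j', hsp', hdj'⟩ := (ih (ys.drop t)).mp hsp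
      refine ⟨t + j', ⟨t, ?_, ?_⟩, ?_⟩
      · rw [List.take_take, min_eq_left (by omega)]; exact ht
      · rw [List.drop_take]
        have : t + j' - t = j' := by omega
        rw [this]; exact hsp'
      · have heq : List.drop (t + j') ys = List.drop j' (List.drop t ys) := by
          rw [List.drop_drop, Nat.add_comm]
        rw [heq]; exact hdj'
    · rintro ⟨j, ⟨t0, ht, hsp'⟩, hdj⟩
      obtain ⟨hteq, hdeq⟩ := take_norm (ys.take j) t0
      set t := min t0 (ys.take j).length with htdef
      rw [← hteq] at ht
      rw [← hdeq] at hsp'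
      have htj : t ≤ j ∧ t ≤ ys.length := by
        have h1 : (ys.take j).length = min j ys.length := List.length_take
        have h2 : t ≤ (ys.take j).length := min_le_right t0 _
        omega
      refine ⟨t, ?_, ?_⟩
      · rwa [List.take_take, min_eq_left htj.1] at ht
      · refine (ih (ys.drop t)).mpr ⟨j - t, ?_, ?_⟩
        · rw [← List.drop_take]
          exact hsp'
        · rw [List.drop_drop]
          have : t + (j - t) = j := by omega
          rw [this]; exact hdj

-- ---- the dp table ----

theorem minv_spec (l : List Int) (hne : l ≠ []) :
    ((PySem.List.min? l (fun v => v)).getD 0) ∈ l ∧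
      ∀ y ∈ l, ((PySem.List.min? l (fun v => v)).getD 0) ≤ y := by
  cases h : PySem.List.min? l (fun v => v) with
  | none => exact absurd ((PySem.List.min?_eq_none_iff _ _).mp h) hne
  | some m =>
    simp only [Option.getD_some]
    exact ⟨PySem.List.min?_mem h, PySem.List.min?_isMin h⟩

theorem svals (xs : List Int) (i j : ℕ) (hj : j ≤ i) :
    SVal xs i - SVal xs j = ((xs.take i).drop j).sum := by
  have h := List.sum_take_add_sum_drop (xs.take i) j
  rw [List.take_take, min_eq_left hj] at h
  unfold SVal
  omega

theorem DVal_le_cands (xs : List Int) (k i : ℕ) (r : Int) :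
    DVal xs (k + 1) i ≤ r ↔ ∃ j : ℕ, j ≤ i ∧ max (DVal xs k j) (SVal xs i - SVal xs j) ≤ r := by
  have hne : ((List.range (i + 1)).map (fun j => max (DVal xs k j) (SVal xs i - SVal xs j))) ≠ [] := by
    simp
  obtain ⟨hmem, hmin⟩ := minv_spec _ hne
  constructor
  · intro h
    rw [List.mem_map] at hmem
    obtain ⟨j, hj, hje⟩ := hmem
    rw [List.mem_range] at hj
    refine ⟨j, by omega, ?_⟩
    rw [hje]
    simpa [DVal] using h
  · rintro ⟨j, hj, hle⟩
    have hmj : j ∈ List.range (i + 1) := by rw [List.mem_range]; omega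
    have hc := hmin _ (List.mem_map_of_mem hmj)
    calc DVal xs (k+1) i
        ≤ max (DVal xs k j) (SVal xs i - SVal xs j) := by simpa [DVal] using hc
      _ ≤ r := hle

theorem DVal_bounds (xs : List Int) : ∀ (k i : ℕ), 0 ≤ DVal xs k i ∧ DVal xs k i ≤ 10 ^ 9 := by
  intro k
  induction k with
  | zero =>
    intro i
    match i with
    | 0 => simp [DVal]
    | _ + 1 => simp [DVal]
  | succ k ih =>
    intro i
    constructor
    · have hne : ((List.range (i + 1)).map (fun j => max (DVal xs k j) (SVal xs i - SVal xs j))) ≠ [] := by simp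
      obtain ⟨hmem, _⟩ := minv_spec _ hne
      rw [List.mem_map] at hmem
      obtain ⟨j, _, hje⟩ := hmem
      have h1 := (ih j).1
      have : DVal xs (k+1) i = max (DVal xs k j) (SVal xs i - SVal xs j) := by
        simp [DVal, ← hje]
      rw [this]
      omega
    · have h := (DVal_le_cands xs k i (10 ^ 9)).mpr ⟨i, le_rfl, by
        have h1 := (ih i).2
        have : SVal xs i - SVal xs i = 0 := by omega
        rw [this]
        omega⟩
      exact h

theorem DVal_le_iff (xs : List Int) :
    ∀ (k i : ℕ), i ≤ xs.length → ∀ r : Int, 0 ≤ r → r < 10 ^ 9 →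
      (DVal xs k i ≤ r ↔ Split r k (xs.take i)) := by
  intro k
  induction k with
  | zero =>
    intro i hi r hr0 hr1
    match i with
    | 0 =>
      simp only [DVal, List.take_zero]
      exact iff_of_true hr0 rfl
    | i' + 1 =>
      simp only [DVal]
      apply iff_of_false (by omega)
      show ¬ (xs.take (i' + 1) = [])
      rw [List.take_eq_nil_iff]
      rintro (h | h)
      · omega
      · subst h; simp at hi
  | succ k ih =>
    intro i hi r hr0 hr1
    rw [DVal_le_cands, split_swap]
    constructor
    · rintro ⟨j, hj, hle⟩
      rw [max_le_iff] at hle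
      refine ⟨j, ?_, ?_⟩
      · rw [List.take_take, min_eq_left hj]
        exact (ih j (by omega) r hr0 hr1).mp hle.1
      · rw [← svals xs i j hj]
        exact hle.2
    · rintro ⟨j, hsp, hdr⟩
      set j₂ := min j i with hj₂
      have hj₂i : j₂ ≤ i := min_le_right j i
      have htk : (xs.take i).take j = xs.take j₂ := by
        rw [List.take_take, hj₂, Nat.min_comm]
      have hdk : (xs.take i).drop j = (xs.take i).drop j₂ := by
        rcases Nat.le_total j i with h | h
        · rw [hj₂, min_eq_left h]
        · rw [List.drop_eq_nil_of_le (by rw [List.length_take]; omega),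
             List.drop_eq_nil_of_le (by rw [List.length_take]; omega)]
      refine ⟨j₂, hj₂i, ?_⟩
      rw [max_le_iff]
      constructor
      · apply (ih j₂ (by omega) r hr0 hr1).mpr
        rw [← htk]; exact hsp
      · rw [svals xs i j₂ hj₂i, ← hdk]
        exact hdr

-- ---- bridges from Port B's loops to the dp table ----

theorem pfx_eq (lis : List Int) (n : Int) (h0 : 0 ≤ n) (hn : n ≤ lis.length) :
    (PySem.List.pyRange 0 n 1).foldl
        (fun pf i => pf ++ [PySem.List.pyGetD pf i 0 + PySem.List.pyGetD lis i 0]) [0]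
      = (List.range (n.toNat + 1)).map (fun i => SVal (lis.take n.toNat) i) := by
  have hgen : ∀ c : ℕ, c ≤ n.toNat →
      (PySem.List.pyRange 0 (c : Int) 1).foldl
          (fun pf i => pf ++ [PySem.List.pyGetD pf i 0 + PySem.List.pyGetD lis i 0]) [0]
        = (List.range (c + 1)).map (fun i => SVal lis i) := by
    intro c
    induction c with
    | zero => intro _; simp [SVal]
    | succ c ih =>
      intro hc
      have hc' : (((c + 1 : ℕ)) : Int) = (c : Int) + 1 := by push_cast; ring
      rw [hc', PySem.List.pyRange_one_succ_right (by omega), List.foldl_append, ih (by omega)]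
      simp only [List.foldl_cons, List.foldl_nil]
      have h1 : PySem.List.pyGetD ((List.range (c + 1)).map (fun i => SVal lis i)) (c : Int) 0
          = SVal lis c := by
        rw [PySem.List.pyGetD_natCast, PySem.List.getD_map_range _ _ _ _ (by omega)]
      have h2 : PySem.List.pyGetD lis (c : Int) 0 = lis[c] := by
        rw [PySem.List.pyGetD_natCast, List.getD_eq_getElem _ _ (by omega)]
      rw [h1, h2]
      have h3 : SVal lis c + lis[c] = SVal lis (c + 1) := by
        unfold SVal
        rw [List.sum_take_succ _ _ (by omega)]
      rw [h3]
      have h4 : List.range (c + 1 + 1) = List.range (c + 1) ++ [c + 1] := List.range_succ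
      rw [h4, List.map_append, List.map_cons, List.map_nil]
  have hcast : ((n.toNat : ℕ) : Int) = n := by omega
  rw [← hcast, hgen n.toNat le_rfl]
  apply List.map_congr_left
  intro i hi
  rw [List.mem_range] at hi
  unfold SVal
  rw [List.take_take, min_eq_left (by omega)]

theorem foldl_const_iterate {α β : Type} (F : β → β) :
    ∀ (l : List α) (acc : β), l.foldl (fun d _ => F d) acc = F^[l.length] acc := by
  intro l
  induction l with
  | nil => intro acc; rfl
  | cons a l ih => intro acc; simp [List.foldl_cons, ih, Function.iterate_succ_apply]

theorem dp0_eq (xs : List Int) (m : ℕ) :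
    (0 : Int) :: List.replicate m (10 ^ 9 : Int)
      = (List.range (m + 1)).map (fun i => DVal xs 0 i) := by
  apply List.ext_getElem
  · simp
  · intro i h1 h2
    match i with
    | 0 => simp [DVal]
    | j + 1 =>
      simp only [List.getElem_cons_succ, List.getElem_map, List.getElem_range]
      rw [List.getElem_replicate]
      simp [DVal]

theorem dp_round (lis : List Int) (n : Int) (h0 : 0 ≤ n) (_hn : n ≤ lis.length) (k : ℕ) :
    ((PySem.List.pyRange 0 (n + 1) 1).map (fun i =>
        ((PySem.List.min? ((PySem.List.pyRange 0 (i + 1) 1).map (fun j =>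
            max (PySem.List.pyGetD ((List.range (n.toNat + 1)).map
                   (fun i' => DVal (lis.take n.toNat) k i')) j 0)
                (PySem.List.pyGetD ((List.range (n.toNat + 1)).map
                   (fun i' => SVal (lis.take n.toNat) i')) i 0
                 - PySem.List.pyGetD ((List.range (n.toNat + 1)).map
                   (fun i' => SVal (lis.take n.toNat) i')) j 0)))
            (fun v => v)).getD 0)))
      = (List.range (n.toNat + 1)).map (fun i => DVal (lis.take n.toNat) (k + 1) i) := by
  have hrange : ∀ b : ℕ, PySem.List.pyRange 0 (b : Int) 1 = (List.range b).map (fun i : ℕ => (i : Int)) := by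
    intro b
    rw [PySem.List.pyRange_one]
    have hb : ((b : Int) - 0).toNat = b := by omega
    rw [hb]
    apply List.map_congr_left
    intro a _
    omega
  have hn1 : (n + 1) = ((n.toNat + 1 : ℕ) : Int) := by omega
  rw [hn1, hrange (n.toNat + 1), List.map_map]
  apply List.map_congr_left
  intro i hi
  rw [List.mem_range] at hi
  simp only [Function.comp_apply]
  have hi1 : ((i : Int) + 1) = ((i + 1 : ℕ) : Int) := by omega
  rw [hi1, hrange (i + 1), List.map_map]
  simp only [DVal]
  congr 1
  congr 1
  apply List.map_congr_left
  intro j hj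
  rw [List.mem_range] at hj
  simp only [Function.comp_apply]
  rw [PySem.List.pyGetD_natCast, PySem.List.pyGetD_natCast, PySem.List.pyGetD_natCast,
      PySem.List.getD_map_range _ _ _ _ (by omega),
      PySem.List.getD_map_range _ _ _ _ (by omega),
      PySem.List.getD_map_range _ _ _ _ (by omega)]

theorem bsLoop_eq (lis : List Int) (n stud L : Int)
    (hmono : ∀ z z' : Int, z ≤ z' → IsPossible lis n stud z = true → IsPossible lis n stud z' = true)
    (hQL : IsPossible lis n stud L = true)
    (hLmin : ∀ z : Int, IsPossible lis n stud z = true → L ≤ z) :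
    ∀ (N : ℕ) (lo hi ans : Int), (hi - lo + 1).toNat ≤ N →
      lo ≤ L → L ≤ hi + 1 → min (10 ^ 9) L ≤ ans → ans ≤ 10 ^ 9 →
      (L ≤ hi ∨ ans = min (10 ^ 9) L) →
      bsLoop lis n stud lo hi ans = min (10 ^ 9) L := by
  intro N
  induction N with
  | zero =>
    intro lo hi ans hN hlo hhi hans1 hans2 hcase
    have hlt : hi < lo := by omega
    rw [bsLoop, dif_neg (by omega)]
    rcases hcase with h | h
    · omega
    · exact h
  | succ N ihN =>
    intro lo hi ans hN hlo hhi hans1 hans2 hcase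
    by_cases hle : lo ≤ hi
    · have hmid := PySem.Int.floordiv_two_mid_bounds hle
      rw [bsLoop, dif_pos hle]
      simp only
      set mid := PySem.Int.floordiv (lo + hi) 2 with hmiddef
      by_cases hq : IsPossible lis n stud mid = true
      · rw [if_pos hq]
        have hLmid : L ≤ mid := hLmin mid hq
        apply ihN
        · omega
        · exact hlo
        · omega
        · omega
        · omega
        · by_cases h : L ≤ mid - 1
          · exact Or.inl h
          · right
            have hLeq : L = mid := by omega
            omega
      · rw [if_neg hq]
        have hmidL : mid < L := by
          by_contra hc
          exact hq (hmono L mid (by omega) hQL)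
        apply ihN
        · omega
        · omega
        · omega
        · exact hans1
        · exact hans2
        · rcases hcase with h | h
          · exact Or.inl h
          · exact Or.inr h
    · rw [bsLoop, dif_neg hle]
      rcases hcase with h | h
      · omega
      · exact h


-- ===== VERDICT (by name: the statement is the Claim_ definition above) =====
theorem dp_iter (lis : List Int) (n : Int) (h0 : 0 ≤ n) (hn : n ≤ lis.length) :
    ∀ k : ℕ,
      (fun dp : List Int =>
        (PySem.List.pyRange 0 (n + 1) 1).map (fun i =>
          ((PySem.List.min? ((PySem.List.pyRange 0 (i + 1) 1).map (fun j =>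
              max (PySem.List.pyGetD dp j 0)
                  (PySem.List.pyGetD ((List.range (n.toNat + 1)).map
                     (fun i' => SVal (lis.take n.toNat) i')) i 0
                   - PySem.List.pyGetD ((List.range (n.toNat + 1)).map
                     (fun i' => SVal (lis.take n.toNat) i')) j 0)))
              (fun v => v)).getD 0)))^[k]
        ((List.range (n.toNat + 1)).map (fun i => DVal (lis.take n.toNat) 0 i))
      = (List.range (n.toNat + 1)).map (fun i => DVal (lis.take n.toNat) k i) := by
  intro k
  induction k with
  | zero => rfl
  | succ k ih =>
    rw [Function.iterate_succ_apply', ih]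
    exact dp_round lis n h0 hn k

-- ===== VERDICT (by name: the statement is the Claim_ definition above) =====
theorem MinPages_spec : Claim_equal_MinPages := by
  unfold Claim_equal_MinPages
  intro lis n stud _hdom hpre
  unfold Spec_MinPages
  by_cases hns : n < stud
  · unfold MinPages MinPages_alt
    rw [if_pos hns, if_pos hns]
  · have hpre' : 0 ≤ n ∧ n ≤ lis.length ∧ (1 ≤ stud ∨ n = 0) ∧ ∀ x ∈ lis.take n.toNat, 0 ≤ x := by
      rcases hpre with h | h
      · exact absurd h hns
      · exact h
    obtain ⟨h0, hn, hstud', hnn0⟩ := hpre'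
    by_cases hstud0 : ¬ 1 ≤ stud
    · -- n = 0 with stud ≤ 0: no books; A's search immediately settles on 0 and B's dp is [0]
      have hn0 : n = 0 := by tauto
      subst hn0
      have hr0 : PySem.List.pyRange 0 0 1 = [] := rfl
      have hA0 : MinPages lis 0 stud = 0 := by
        unfold MinPages
        rw [if_neg hns]
        simp only [hr0, List.foldl_nil]
        rw [bsLoop, dif_pos (by omega)]
        have hmid : PySem.Int.floordiv (0 + 0) 2 = 0 := rfl
        simp only [hmid]
        have hip : IsPossible lis 0 stud 0 = true := rfl
        rw [if_pos hip, bsLoop, dif_neg (by omega)]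
        omega
      have hB0 : MinPages_alt lis 0 stud = 0 := by
        unfold MinPages_alt
        rw [if_neg hns]
        simp only [hr0, List.foldl_nil]
        rw [show PySem.List.pyRange 0 stud 1 = [] from PySem.List.pyRange_one_eq_nil (by omega),
            List.foldl_nil]
        rfl
      rw [hA0, hB0]
    have hstud : 1 ≤ stud := by omega
    set m := n.toNat with hm
    set xs := lis.take m with hxs
    have hnn : ∀ x ∈ xs, 0 ≤ x := hnn0
    have hlen : xs.length = m := by rw [hxs, List.length_take]; omega
    have hm1 : 1 ≤ m := by omega
    have hne : xs ≠ [] := by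
      intro hc
      rw [hc] at hlen
      simp at hlen
      omega
    -- the greedy predicate is monotone, true at the total sum, false below 0
    have hPmono : ∀ z z' : Int, z ≤ z' →
        IsPossible lis n stud z = true → IsPossible lis n stud z' = true := by
      intro z z' hzz h
      rw [isPossible_eq lis n stud _ h0 hn] at h ⊢
      exact gGo_mono stud xs 1 0 1 0 z z' hnn h hstud le_rfl le_rfl (Or.inr le_rfl) le_rfl hzz
    have hfi : ∀ r : Int, IsPossible lis n stud r = true ↔ Split r stud.toNat xs := by
      intro r
      rw [isPossible_eq lis n stud r h0 hn]
      exact feas_iff stud r xs hnn hstud hne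
    have hsum0 : 0 ≤ xs.sum := List.sum_nonneg hnn
    have hPsum : IsPossible lis n stud xs.sum = true := by
      rw [hfi]
      rw [show stud.toNat = (stud.toNat - 1) + 1 by omega]
      exact ⟨xs.length, by rw [List.take_length], by rw [List.drop_length]; exact Split_nil _ hsum0 _⟩
    have hbdd : ∀ z : Int, IsPossible lis n stud z = true → 0 ≤ z := by
      intro z hz
      by_contra hc
      rw [isPossible_eq lis n stud z h0 hn] at hz
      rw [show List.take n.toNat lis = xs from rfl] at hz
      rcases hxc : xs with _ | ⟨x, t⟩
      · exact hne hxc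
      · have hx0 : 0 ≤ x := hnn x (by rw [hxc]; simp)
        rw [hxc] at hz
        simp only [gGo, if_pos (show x > z by omega)] at hz
        exact Bool.false_ne_true hz
    obtain ⟨L, hQL, hLmin⟩ :=
      Int.exists_least_of_bdd (P := fun z => IsPossible lis n stud z = true)
        ⟨0, hbdd⟩ ⟨xs.sum, hPsum⟩
    have hL0 : 0 ≤ L := hbdd L hQL
    have hLsum : L ≤ xs.sum := hLmin _ hPsum
    -- A's binary search returns min(10^9, L)
    have hA : MinPages lis n stud = min (10 ^ 9) L := by
      unfold MinPages
      rw [if_neg hns]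
      simp only
      rw [sum_loop_eq lis n h0 hn]
      exact bsLoop_eq lis n stud L hPmono hQL hLmin (xs.sum - 0 + 1).toNat 0 xs.sum (10 ^ 9)
        le_rfl hL0 (by omega) (by omega) (by omega) (Or.inl hLsum)
    -- B's dp returns DVal xs stud.toNat m
    have hB : MinPages_alt lis n stud = DVal xs stud.toNat m := by
      unfold MinPages_alt
      rw [if_neg hns]
      simp only
      rw [pfx_eq lis n h0 hn]
      rw [dp0_eq xs m]
      rw [foldl_const_iterate]
      rw [PySem.List.length_pyRange_one]
      rw [show (stud - 0).toNat = stud.toNat by omega]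
      rw [dp_iter lis n h0 hn stud.toNat]
      rw [PySem.List.pyGetD_eq_getElem _ _ (show (0:Int) ≤ n by omega) (by simp only [List.length_map, List.length_range]; push_cast; omega)]
      simp only [List.getElem_map, List.getElem_range]
      rfl
    rw [hA, hB]
    -- compare min(10^9, L) with the dp optimum
    have hd := DVal_bounds xs stud.toNat m
    have hiff : ∀ r : Int, 0 ≤ r → r < 10 ^ 9 → (DVal xs stud.toNat m ≤ r ↔ Split r stud.toNat xs) := by
      intro r h1 h2
      have := DVal_le_iff xs stud.toNat m (by omega) r h1 h2
      rwa [List.take_of_length_le (by omega)] at this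
    by_cases hdc : DVal xs stud.toNat m < 10 ^ 9
    · have h1 : Split (DVal xs stud.toNat m) stud.toNat xs := (hiff _ hd.1 hdc).mp le_rfl
      have hLd : L ≤ DVal xs stud.toNat m := hLmin _ ((hfi _).mpr h1)
      have h2 : Split L stud.toNat xs := (hfi L).mp hQL
      have hdL : DVal xs stud.toNat m ≤ L := (hiff L hL0 (by omega)).mpr h2
      omega
    · have hL9 : ¬ L < 10 ^ 9 := by
        intro hc
        have h2 : Split L stud.toNat xs := (hfi L).mp hQL
        have := (hiff L hL0 hc).mpr h2
        omega
      omega
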